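-- pv_equiv track=rewrite | github.com/PiotrPegiel/PP1 | 13-Test3/p1.py | f
-- ===== SOURCE A (Python) =====
-- def f(w):
--     result = 0
--     samo = ["a","e","i","o","u","y"]
--     for i in range(len(w)):
--         if i == (len(w)-1):
--             if w[i] in samo:
--                 result += 3
--             else:
--                 result += 1
--         else:
--             if w[i] in samo:
--                 result += 2
--             else:
--                 result += 1
--     return result
-- ===== SOURCE B (Python) =====
-- def f(w):
--     vowels = "aeiouy"
--     score = len(w)
--     for v in vowels:
--         score += w.count(v)
--     if w and w[-1] in vowels:
--         score += 1
--     return score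
-- ===== Notes on version B (the rewrite author's own statement) =====
-- stated objective: faster
-- what changed: Replaces A's per-index loop with an i==len-1 branch by six C-level str.count scans (one per vowel) combined with the length and a last-char bonus; no per-character Python-level branching remains.
import Mathlib
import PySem

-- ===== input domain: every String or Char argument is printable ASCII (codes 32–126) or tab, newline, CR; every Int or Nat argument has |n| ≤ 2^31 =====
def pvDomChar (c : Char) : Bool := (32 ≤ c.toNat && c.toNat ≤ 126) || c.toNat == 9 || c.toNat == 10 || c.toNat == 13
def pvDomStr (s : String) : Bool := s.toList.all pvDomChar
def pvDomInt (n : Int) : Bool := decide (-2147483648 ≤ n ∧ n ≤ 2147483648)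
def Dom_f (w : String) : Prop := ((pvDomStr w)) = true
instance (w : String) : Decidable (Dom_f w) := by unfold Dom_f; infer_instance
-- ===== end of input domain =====

-- B replaces A's per-index loop (with its i == len-1 branch) by per-vowel occurrence counts:
-- score = length + Σ_v count(v) over the six vowels, plus 1 if the last character is a vowel (objective: faster, measured).

-- ===== PORT A =====
-- the vowel list ["a","e","i","o","u","y"]; w[i] is a single char, so membership is char membership
def pvSamo : List Char := ['a', 'e', 'i', 'o', 'u', 'y']

def f (w : String) : Int :=
  let l := w.toList
  let n := l.length
  (List.range n).foldl (fun result i =>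
    if i = n - 1 then
      if (l.getD i ' ') ∈ pvSamo then result + 3 else result + 1
    else
      if (l.getD i ' ') ∈ pvSamo then result + 2 else result + 1) 0

-- ===== PORT B =====
def pvVowels : List Char := ['a', 'e', 'i', 'o', 'u', 'y']

def f_alt (w : String) : Int :=
  let l := w.toList
  let score := pvVowels.foldl (fun s v => s + (l.count v : Int)) (l.length : Int)
  match l.getLast? with
  | some c => if c ∈ pvVowels then score + 1 else score
  | none => score

-- ===== PRECONDITION & SPEC =====
def Spec_f (w : String) (out : Int) : Prop := out = f_alt w
instance (w : String) (out : Int) : Decidable (Spec_f w out) := by unfold Spec_f; infer_instance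

-- ===== CLAIM (what is proved, stated in full; the proofs are below) =====
def Claim_equal_f : Prop := ∀ (w : String), Dom_f w → Spec_f w (f w)

-- ===== LEMMAS AND PROOFS =====

def pvVow (c : Char) : Bool := c ∈ pvSamo

def pvStep (l : List Char) (n : Nat) (result : Int) (i : Nat) : Int :=
  if i = n - 1 then
    if (l.getD i ' ') ∈ pvSamo then result + 3 else result + 1
  else
    if (l.getD i ' ') ∈ pvSamo then result + 2 else result + 1

lemma pv_prefix (m : Nat) (l : List Char) (n : Nat) (acc : Int) (hm : m < n) (hl : m ≤ l.length) :
    (List.range m).foldl (pvStep l n) acc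
      = acc + m + ((l.take m).countP pvVow : Int) := by
  induction m generalizing acc with
  | zero => simp
  | succ k ih =>
    rw [List.range_succ, List.foldl_append]
    rw [ih _ (by omega) (by omega)]
    have hk : k < l.length := by omega
    have htake : l.take (k+1) = l.take k ++ [l[k]] := by
      rw [List.take_add_one]; simp [List.getElem?_eq_getElem hk]
    have hget : l.getD k ' ' = l[k] := by
      simp [List.getD, List.getElem?_eq_getElem hk]
    have hne : k ≠ n - 1 := by omega
    simp only [List.foldl_cons, List.foldl_nil, pvStep, if_neg hne, hget, htake,
      List.countP_append, List.countP_cons, List.countP_nil]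
    by_cases hv : l[k] ∈ pvSamo
    · simp [pvVow, pvSamo] at *
      rcases hv with h|h|h|h|h|h <;> simp [h] <;> ring
    · have : pvVow l[k] = false := by
        simp [pvVow, pvSamo] at *; tauto
      simp [hv, this]; ring

-- A's loop computes length + vowel count + last-char bonus
lemma pv_list (l : List Char) :
    (List.range l.length).foldl (pvStep l l.length) 0
      = (l.length : Int) + (l.countP pvVow : Int) +
        (match l.getLast? with
         | some c => if pvVow c then 1 else 0
         | none => 0) := by
  induction l using List.reverseRecOn with
  | nil => simp
  | append_singleton xs x _ =>
    have hlen : (xs ++ [x]).length = xs.length + 1 := by simp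
    rw [hlen, List.range_succ, List.foldl_append]
    rw [pv_prefix xs.length (xs ++ [x]) (xs.length + 1) 0 (by omega) (by simp)]
    have htake : (xs ++ [x]).take xs.length = xs := by simp
    have hget : (xs ++ [x]).getD xs.length ' ' = x := by simp [List.getD]
    have hlast : (xs ++ [x]).getLast? = some x := by simp
    simp only [List.foldl_cons, List.foldl_nil, pvStep, htake, hget, hlast,
      Nat.add_sub_cancel, List.countP_append, List.countP_cons, List.countP_nil]
    by_cases hv : x ∈ pvSamo
    · have : pvVow x = true := by simp [pvVow, pvSamo] at *; tauto
      simp [hv, this]; ring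
    · have : pvVow x = false := by simp [pvVow, pvSamo] at *; tauto
      simp [hv, this]; ring

-- the six per-vowel counts sum to the vowel count
lemma pv_count_split (l : List Char) :
    pvVowels.foldl (fun s v => s + (l.count v : Int)) (l.length : Int)
      = (l.length : Int) + (l.countP pvVow : Int) := by
  simp only [pvVowels, List.foldl_cons, List.foldl_nil]
  have : (l.countP pvVow : Int)
      = l.count 'a' + l.count 'e' + l.count 'i' + l.count 'o' + l.count 'u' + l.count 'y' := by
    induction l with
    | nil => simp
    | cons c t ih =>
      simp only [List.countP_cons, List.count_cons]
      by_cases h : pvVow c = true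
      · simp only [pvVow, pvSamo, List.mem_cons, List.not_mem_nil, or_false,
          decide_eq_true_eq] at h
        rcases h with h|h|h|h|h|h <;> subst h <;>
          simp only [pvVow, pvSamo] <;> push_cast <;> simp <;> omega
      · have h' : pvVow c = false := by simpa using h
        have hc : c ≠ 'a' ∧ c ≠ 'e' ∧ c ≠ 'i' ∧ c ≠ 'o' ∧ c ≠ 'u' ∧ c ≠ 'y' := by
          simp only [pvVow, pvSamo, List.mem_cons, List.not_mem_nil, or_false,
            decide_eq_false_iff_not, not_or] at h'
          tauto
        obtain ⟨h1, h2, h3, h4, h5, h6⟩ := hc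
        simp [h', h1, h2, h3, h4, h5, h6]
        omega
  rw [this]; ring

-- ===== VERDICT (by name: the statement is the Claim_ definition above) =====
theorem f_spec : Claim_equal_f := by
  intro w _
  unfold Spec_f f f_alt
  show (List.range w.toList.length).foldl (pvStep w.toList w.toList.length) 0 = _
  dsimp only
  rw [pv_list, pv_count_split]
  rcases h : w.toList.getLast? with _ | c
  · simp
  · by_cases hv : c ∈ pvVowels
    · have : pvVow c = true := by simpa [pvVow, pvSamo, pvVowels] using hv
      simp [this, hv]
    · have : pvVow c = false := by simpa [pvVow, pvSamo, pvVowels] using hv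
      simp [this, hv]
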